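-- pv_equiv track=rewrite | github.com/qualidea1217/Align4d | readAlignment.py | get_sequence2target_alignment
-- ===== SOURCE A (Python) =====
-- def get_sequence2target_alignment(target, speaker_sequences):
--   aligned_sequences = []
--   for sequence in speaker_sequences:
--     tmp_res = []
--     target_gap = 0
--     for index, token in enumerate(sequence):
--       if token != '-' and target[index] != '-':
--         tmp_res.append(index-target_gap)
--       elif token != '-' and target[index] == '-':
--         target_gap += 1
--         tmp_res.append(-1)
--       elif token == '-' and target[index] == '-':
--         target_gap += 1
--     aligned_sequences.append(tmp_res)
--   return aligned_sequences
-- ===== SOURCE B (Python) =====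
-- def get_sequence2target_alignment(target, speaker_sequences):
--     # Precompute once, over target only: for each position i,
--     # table[i] = i - (number of '-' in target before i) if target[i] != '-', else None.
--     table = []
--     gaps = 0
--     for i, tok in enumerate(target):
--         if tok == '-':
--             table.append(None)
--             gaps += 1
--         else:
--             table.append(i - gaps)
--     result = []
--     for seq in speaker_sequences:
--         result.append([-1 if table[i] is None else table[i]
--                        for i, tok in enumerate(seq) if tok != '-'])
--     return result
-- ===== Notes on version B (the rewrite author's own statement) =====
-- stated objective: alternative
-- what changed: B precomputes a shared target->position table (running gap count) in one pass over target, then each sequence is a single filtering pass reading the table, instead of A re-deriving the gap counter inside every sequence's loop.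
import Mathlib
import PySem

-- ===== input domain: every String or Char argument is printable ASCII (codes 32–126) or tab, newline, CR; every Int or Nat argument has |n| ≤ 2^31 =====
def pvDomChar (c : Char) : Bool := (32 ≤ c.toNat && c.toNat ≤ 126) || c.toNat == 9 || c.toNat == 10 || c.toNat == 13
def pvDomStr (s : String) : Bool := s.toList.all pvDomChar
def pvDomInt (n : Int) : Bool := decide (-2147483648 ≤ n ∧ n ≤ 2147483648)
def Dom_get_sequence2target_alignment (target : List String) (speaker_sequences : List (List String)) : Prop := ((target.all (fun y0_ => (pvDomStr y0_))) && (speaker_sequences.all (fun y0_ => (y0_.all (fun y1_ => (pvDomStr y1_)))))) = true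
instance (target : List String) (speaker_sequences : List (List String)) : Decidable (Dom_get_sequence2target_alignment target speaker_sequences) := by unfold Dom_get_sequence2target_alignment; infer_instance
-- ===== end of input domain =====

-- B replaces A's per-sequence gap counter by one shared target→position table built in a
-- single pass over target (objective: alternative decomposition; same asymptotic cost).

-- ===== PORT A =====
-- target[index]: pyGet? none = IndexError, excluded by Pre_; the default "" is never used there
def pvGetTok (target : List String) (i : Int) : String :=
  (PySem.List.pyGet? target i).getD ""

-- inner loop of A: recursion over the sequence with the running index and target_gap
def pvASeq (target : List String) (seq : List String) (i : Nat) (gap : Int) : List Int :=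
  match seq with
  | [] => []
  | tok :: rest =>
    let t := pvGetTok target (i : Int)
    if tok ≠ "-" ∧ t ≠ "-" then ((i : Int) - gap) :: pvASeq target rest (i+1) gap
    else if tok ≠ "-" ∧ t = "-" then (-1) :: pvASeq target rest (i+1) (gap+1)
    else if tok = "-" ∧ t = "-" then pvASeq target rest (i+1) (gap+1)
    else pvASeq target rest (i+1) gap

def get_sequence2target_alignment (target : List String) (speaker_sequences : List (List String)) : List (List Int) :=
  speaker_sequences.map (fun s => pvASeq target s 0 0)

-- ===== PORT B =====
-- one pass over target: table[i] = some (i - gaps before i) for non-gap positions, none for gaps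
def pvBTable (target : List String) (i : Nat) (gaps : Int) : List (Option Int) :=
  match target with
  | [] => []
  | tok :: rest =>
    if tok = "-" then none :: pvBTable rest (i+1) (gaps+1)
    else some ((i : Int) - gaps) :: pvBTable rest (i+1) gaps

-- per-sequence filtering pass of B; table[i]? = none is Python's IndexError, excluded by Pre_
def pvBSeq (table : List (Option Int)) (seq : List String) (i : Nat) : List Int :=
  match seq with
  | [] => []
  | tok :: rest =>
    if tok ≠ "-" then
      match table[i]? with
      | some none => (-1) :: pvBSeq table rest (i+1)
      | some (some m) => m :: pvBSeq table rest (i+1)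
      | none => pvBSeq table rest (i+1)
    else pvBSeq table rest (i+1)

def get_sequence2target_alignment_alt (target : List String) (speaker_sequences : List (List String)) : List (List Int) :=
  let table := pvBTable target 0 0
  speaker_sequences.map (fun s => pvBSeq table s 0)

-- ===== PRECONDITION & SPEC =====
-- Pre_ excludes exactly the inputs where A raises IndexError: a sequence longer than target.
def Pre_get_sequence2target_alignment (target : List String) (speaker_sequences : List (List String)) : Prop :=
  ∀ s ∈ speaker_sequences, s.length ≤ target.length
instance (target : List String) (speaker_sequences : List (List String)) : Decidable (Pre_get_sequence2target_alignment target speaker_sequences) := by unfold Pre_get_sequence2target_alignment; infer_instance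

def pvWitness_get_sequence2target_alignment : List String × List (List String) :=
  (["a", "-", "b"], [["x", "-", "y"], ["-", "x"]])

def Spec_get_sequence2target_alignment (target : List String) (speaker_sequences : List (List String)) (out : List (List Int)) : Prop := out = get_sequence2target_alignment_alt target speaker_sequences
instance (target : List String) (speaker_sequences : List (List String)) (out : List (List Int)) : Decidable (Spec_get_sequence2target_alignment target speaker_sequences out) := by unfold Spec_get_sequence2target_alignment; infer_instance

-- ===== CLAIM (what is proved, stated in full; the proofs are below) =====
def Claim_equal_get_sequence2target_alignment : Prop := ∀ (target : List String) (speaker_sequences : List (List String)), Dom_get_sequence2target_alignment target speaker_sequences → Pre_get_sequence2target_alignment target speaker_sequences → Spec_get_sequence2target_alignment target speaker_sequences (get_sequence2target_alignment target speaker_sequences)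

-- ===== LEMMAS AND PROOFS =====

-- number of '-' among the first i entries of target, as an Int
def pvCountG (target : List String) (i : Nat) : Int := ((target.take i).count "-" : Int)

theorem pvCountG_zero (target : List String) : pvCountG target 0 = 0 := by
  simp [pvCountG]

theorem pvCountG_succ (target : List String) (i : Nat) (h : i < target.length) :
    pvCountG target (i+1) = pvCountG target i + (if target[i] = "-" then 1 else 0) := by
  unfold pvCountG
  have ht : List.take (i+1) target = List.take i target ++ [target[i]] := by
    rw [List.take_add_one, List.getElem?_eq_getElem h, Option.toList_some]
  rw [ht, List.count_append]
  by_cases hc : target[i] = "-" <;>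
    simp [List.count_singleton, hc] <;> push_cast <;> ring

theorem pvBTable_get? (target : List String) :
    ∀ (off : Nat) (g : Int) (j : Nat) (h : j < target.length),
      (pvBTable target off g)[j]? =
        some (if target[j]'h = "-" then none
              else some ((off : Int) + j - (g + pvCountG target j))) := by
  induction target with
  | nil => intro off g j h; simp at h
  | cons t rest ih =>
    intro off g j h
    cases j with
    | zero =>
      by_cases hc : t = "-" <;> simp [pvBTable, pvCountG, hc]
    | succ j =>
      have hj : j < rest.length := by simpa using h
      have hcnt : pvCountG (t :: rest) (j+1) = (if t = "-" then 1 else 0) + pvCountG rest j := by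
        unfold pvCountG
        by_cases hc : t = "-" <;> simp [List.take_succ_cons, hc] <;> push_cast <;> ring
      by_cases hc : t = "-"
      · subst hc
        have hcnt' : pvCountG ("-" :: rest) (j+1) = 1 + pvCountG rest j := by simpa using hcnt
        simp only [pvBTable, if_true, List.getElem?_cons_succ, List.getElem_cons_succ,
          ih (off+1) (g+1) j hj]
        split_ifs with hr
        · rfl
        · simp only [Option.some.injEq, Option.some.injEq]
          rw [hcnt']
          push_cast
          ring
      · have hcnt' : pvCountG (t :: rest) (j+1) = pvCountG rest j := by simpa [hc] using hcnt
        simp only [pvBTable, if_neg hc, List.getElem?_cons_succ, List.getElem_cons_succ,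
          ih (off+1) g j hj]
        split_ifs with hr
        · rfl
        · simp only [Option.some.injEq]
          rw [hcnt']
          push_cast
          ring

theorem pvSeq_eq (target : List String) :
    ∀ (seq : List String) (i : Nat) (g : Int), i + seq.length ≤ target.length →
      g = pvCountG target i →
      pvASeq target seq i g = pvBSeq (pvBTable target 0 0) seq i := by
  intro seq
  induction seq with
  | nil => intro i g _ _; simp [pvASeq, pvBSeq]
  | cons tok rest ih =>
    intro i g hlen hg
    have hi : i < target.length := by simp at hlen; omega
    have hget : pvGetTok target (i : Int) = target[i] := by
      simp [pvGetTok, List.getElem?_eq_getElem hi]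
    have hrest : i + 1 + rest.length ≤ target.length := by simp at hlen; omega
    have hT := pvBTable_get? target 0 0 i hi
    have hsucc := pvCountG_succ target i hi
    by_cases htok : tok = "-" <;> by_cases ht : target[i] = "-"
    · -- token gap, target gap: A increments gap, B skips
      simp only [pvASeq, pvBSeq]
      simp [hget, htok, ht]
      exact ih (i+1) (g+1) hrest (by simp [hsucc, ht, hg])
    · -- token gap, target token: both skip, gap unchanged
      simp only [pvASeq, pvBSeq]
      simp [hget, htok, ht]
      exact ih (i+1) g hrest (by simp [hsucc, ht, hg])
    · -- real token, target gap: both emit -1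
      simp only [pvASeq, pvBSeq]
      simp [hget, htok, ht, hT]
      exact ih (i+1) (g+1) hrest (by simp [hsucc, ht, hg])
    · -- real token, target token: A emits index - gap, B reads the table
      simp only [pvASeq, pvBSeq]
      simp [hget, htok, ht, hT]
      refine ⟨by omega, ?_⟩
      exact ih (i+1) g hrest (by simp [hsucc, ht, hg])

-- ===== VERDICT (by name: the statement is the Claim_ definition above) =====
theorem get_sequence2target_alignment_spec : Claim_equal_get_sequence2target_alignment := by
  intro target seqs _ hpre
  unfold Spec_get_sequence2target_alignment
  unfold get_sequence2target_alignment get_sequence2target_alignment_alt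
  simp only []
  apply List.map_congr_left
  intro s hs
  exact pvSeq_eq target s 0 0 (by simpa using hpre s hs) (pvCountG_zero target).symm
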